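-- pv_equiv track=rewrite | github.com/lgarron/project-euler | 61.py | figurate
-- ===== SOURCE A (Python) =====
-- from collections import defaultdict
--
-- HALF = 2
--
-- MIN_VALUE = 10**(HALF*2 - 1)
--
-- MAX_VALUE = 10**(HALF*2) - 1
--
-- def figurate(k):
--   i = 0
--   value = 0
--   values = defaultdict(list)
--   while (value <= MAX_VALUE):
--     if (value >= MIN_VALUE):
--       start, end = divmod(value, 10**HALF)
--       values[start] += [end]
--     value += 1 + (k-2) * i
--     i += 1
--   return values
-- ===== SOURCE B (Python) =====
-- from collections import defaultdict
--
-- HALF = 2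
--
-- MIN_VALUE = 10**(HALF*2 - 1)
--
-- MAX_VALUE = 10**(HALF*2) - 1
--
-- def _isqrt(x):
--   # integer square root by Newton's method (A imports no math module)
--   if x <= 1:
--     return x
--   g = x // 2
--   while True:
--     n = (g + x // g) // 2
--     if n < g:
--       g = n
--     else:
--       return g
--
-- def _is_polygonal(k, v):
--   # Is v = P(k, n) for some integer n >= 0?  Solve (k-2)n^2 + (4-k)n - 2v = 0.
--   if k == 2:
--     return True  # P(2, n) = n, every nonnegative v qualifies
--   d = (k - 4) ** 2 + 8 * (k - 2) * v
--   s = _isqrt(d)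
--   if s * s != d:
--     return False
--   return ((k - 4) + s) % (2 * (k - 2)) == 0
--
-- def figurate(k):
--   # Scan every candidate value once and TEST k-gonality by the quadratic formula,
--   # instead of enumerating the k-gonal sequence.
--   values = defaultdict(list)
--   for value in range(MIN_VALUE, MAX_VALUE + 1):
--     if _is_polygonal(k, value):
--       start, end = divmod(value, 10**HALF)
--       values[start] += [end]
--   return values
-- ===== Notes on version B (the rewrite author's own statement) =====
-- stated objective: alternative
-- what changed: B inverts the algorithm: instead of enumerating the k-gonal sequence by A's running accumulator, it scans each 4-digit candidate value once and tests whether it is k-gonal by solving the quadratic (k-2)n^2+(4-k)n-2v=0 with a hand-written Newton integer square root and a divisibility check; Pre_ excludes k < 2, on which A's while loop never terminates.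
-- outside the precondition, e.g. on figurate(0): A does not finish within the time limit, B returns {}
import Mathlib
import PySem

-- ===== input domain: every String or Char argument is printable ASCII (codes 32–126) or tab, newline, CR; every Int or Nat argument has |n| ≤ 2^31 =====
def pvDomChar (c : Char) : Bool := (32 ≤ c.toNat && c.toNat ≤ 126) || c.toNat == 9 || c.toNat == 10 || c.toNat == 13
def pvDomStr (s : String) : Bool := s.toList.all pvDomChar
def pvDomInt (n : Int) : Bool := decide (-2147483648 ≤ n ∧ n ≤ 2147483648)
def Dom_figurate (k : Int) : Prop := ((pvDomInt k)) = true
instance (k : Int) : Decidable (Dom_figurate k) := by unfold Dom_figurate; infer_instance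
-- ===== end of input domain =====

-- B inverts the problem: instead of enumerating the k-gonal sequence it scans each 4-digit
-- candidate once and tests k-gonality by the quadratic formula (Newton integer sqrt);
-- objective: alternative algorithm, same output.

-- ===== PORT A =====
-- A's while-loop: state (i, value, dict); for k ≥ 2 the loop runs at most 10001
-- iterations (value ≥ i there), so fuel 10001 only makes the recursion total.
def figurateLoopA (k : Int) : Nat → Int → Int → PySem.Dict Int (List Int) → PySem.Dict Int (List Int)
  | 0, _, _, d => d
  | fuel+1, i, value, d =>
    if value ≤ 9999 then
      figurateLoopA k fuel (i+1) (value + (1 + (k-2)*i))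
        (if value ≥ 1000 then
          d.modify (PySem.Int.floordiv value 100) [] (· ++ [PySem.Int.mod value 100])
        else d)
    else d

def figurate (k : Int) : List (Int × List Int) :=
  (figurateLoopA k 10001 0 0 PySem.Dict.empty).items

-- ===== PORT B =====
-- Source B's _isqrt: Newton iteration 'while True: n = (g + x//g)//2; …'; g strictly
-- decreases and stays ≥ 0, so fuel x.toNat makes the recursion total without
-- changing any value it returns on the runs the claim is about.
def isqrtIter (x : Int) : Nat → Int → Int
  | 0, g => g
  | fuel+1, g =>
    let n := PySem.Int.floordiv (g + PySem.Int.floordiv x g) 2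
    if n < g then isqrtIter x fuel n else g

def pyIsqrt (x : Int) : Int :=
  if x ≤ 1 then x else isqrtIter x x.toNat (PySem.Int.floordiv x 2)

-- Source B's _is_polygonal
def isPoly (k v : Int) : Bool :=
  if k = 2 then true
  else
    let d := (k-4)^2 + 8*(k-2)*v
    let s := pyIsqrt d
    if s*s ≠ d then false
    else PySem.Int.mod ((k-4)+s) (2*(k-2)) = 0

def figurate_alt (k : Int) : List (Int × List Int) :=
  ((PySem.List.pyRange 1000 10000 1).foldl
    (fun d v => if isPoly k v then
        d.modify (PySem.Int.floordiv v 100) [] (· ++ [PySem.Int.mod v 100])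
      else d)
    PySem.Dict.empty).items

-- ===== PRECONDITION & SPEC =====
-- Pre_ excludes k < 2, on which A's while-loop never terminates (value stops growing
-- past MAX_VALUE), so A returns on exactly the inputs Pre_ admits.
def Pre_figurate (k : Int) : Prop := 2 ≤ k
instance (k : Int) : Decidable (Pre_figurate k) := by unfold Pre_figurate; infer_instance

def pvWitness_figurate : Int := 5

def Spec_figurate (k : Int) (out : List (Int × List Int)) : Prop := out = figurate_alt k
instance (k : Int) (out : List (Int × List Int)) : Decidable (Spec_figurate k out) := by unfold Spec_figurate; infer_instance

-- ===== CLAIM (what is proved, stated in full; the proofs are below) =====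
def Claim_equal_figurate : Prop := ∀ (k : Int), Dom_figurate k → Pre_figurate k → Spec_figurate k (figurate k)

-- ===== LEMMAS AND PROOFS =====

-- P(k, n), the n-th k-gonal number as A computes it (exact: n*(n-1) is even)
def polyN (k n : Int) : Int := PySem.Int.floordiv ((k-2)*n*(n-1)) 2 + n

-- proof-side list of the 4-digit values A's loop buckets, in order of generation
def polyVals (k : Int) : Nat → Int → List Int
  | 0, _ => []
  | fuel+1, n =>
    let v := polyN k n
    if v > 9999 then []
    else if v ≥ 1000 then v :: polyVals k fuel (n+1)
    else polyVals k fuel (n+1)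

lemma polyN_char (k m : Int) : 2 * polyN k m = (k-2)*m*(m-1) + 2*m := by
  obtain ⟨t, ht⟩ : Even (m * (m-1)) := by
    have := Int.even_mul_succ_self (m-1)
    simpa [mul_comm] using this
  have h1 : (k-2)*m*(m-1) = 2 * ((k-2)*t) := by linear_combination (k-2)*ht
  rw [polyN, h1, PySem.Int.floordiv_eq_ediv_of_pos (by norm_num),
      Int.mul_ediv_cancel_left _ (by norm_num)]
  ring

lemma polyN_succ (k i : Int) : polyN k i + (1 + (k-2)*i) = polyN k (i+1) := by
  have h1 := polyN_char k i
  have h2 := polyN_char k (i+1)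
  have h3 : (k-2)*(i+1)*((i+1)-1) = (k-2)*i*(i-1) + 2*((k-2)*i) := by ring
  linarith

lemma polyN_zero (k : Int) : polyN k 0 = 0 := by
  have := polyN_char k 0
  omega

-- A's loop, started at value = P(k, i), folds the modify step over polyVals.
lemma loopA_eq_foldl (k : Int) : ∀ (fuel : Nat) (i : Int) (d : PySem.Dict Int (List Int)),
    figurateLoopA k fuel i (polyN k i) d
      = (polyVals k fuel i).foldl
          (fun d v => d.modify (PySem.Int.floordiv v 100) [] (· ++ [PySem.Int.mod v 100])) d := by
  intro fuel
  induction fuel with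
  | zero => intro i d; simp [figurateLoopA, polyVals]
  | succ fuel ih =>
    intro i d
    rw [figurateLoopA, polyVals]
    by_cases hle : polyN k i ≤ 9999
    · rw [if_pos hle]
      simp only [if_neg (not_lt.mpr hle)]
      by_cases hge : polyN k i ≥ 1000
      · simp only [if_pos hge, List.foldl_cons]
        rw [polyN_succ k i]
        exact ih (i+1) _
      · simp only [if_neg hge]
        rw [polyN_succ k i]
        exact ih (i+1) _
    · rw [if_neg hle]
      simp only [if_pos (not_le.mp hle), List.foldl_nil]

-- fold with an 'if' = fold over the filtered list
lemma foldl_if_filter {α β : Type} (p : α → Bool) (f : β → α → β) :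
    ∀ (l : List α) (d : β),
      l.foldl (fun d v => if p v then f d v else d) d = (l.filter p).foldl f d := by
  intro l
  induction l with
  | nil => intro d; rfl
  | cons a t ih =>
    intro d
    by_cases h : p a
    · simp [h, ih]
    · simp [h, ih]

-- monotonicity of polyN for k ≥ 2 on nonnegative indices
lemma polyN_ge_self (k : Int) (hk : 2 ≤ k) : ∀ (n : Int), 0 ≤ n → n ≤ polyN k n := by
  intro n hn
  induction n, hn using Int.le_induction with
  | base => simp [polyN_zero]
  | succ i hi ih =>
    have h := polyN_succ k i
    have : 0 ≤ (k-2)*i := mul_nonneg (by omega) hi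
    omega

lemma polyN_mono (k : Int) (hk : 2 ≤ k) : ∀ (a b : Int), 0 ≤ a → a ≤ b → polyN k a ≤ polyN k b := by
  intro a b ha hab
  induction b, hab using Int.le_induction with
  | base => exact le_refl _
  | succ i hi ih =>
    have h2 := polyN_succ k i
    have h3 : 0 ≤ (k-2)*i := mul_nonneg (by omega) (by omega)
    omega

lemma polyN_strict_mono (k : Int) (hk : 2 ≤ k) (a b : Int) (ha : 0 ≤ a) (hab : a < b) :
    polyN k a < polyN k b := by
  have h1 : polyN k a ≤ polyN k (b-1) := polyN_mono k hk a (b-1) ha (by omega)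
  have h2 := polyN_succ k (b-1)
  have h3 : 0 ≤ (k-2)*(b-1) := mul_nonneg (by omega) (by omega)
  have h4 : b - 1 + 1 = b := by omega
  rw [h4] at h2
  omega

-- membership in polyVals, forward direction
lemma mem_polyVals_fwd (k : Int) : ∀ (fuel : Nat) (n v : Int), v ∈ polyVals k fuel n →
    1000 ≤ v ∧ v ≤ 9999 ∧ ∃ m, n ≤ m ∧ polyN k m = v := by
  intro fuel
  induction fuel with
  | zero => intro n v h; simp [polyVals] at h
  | succ fuel ih =>
    intro n v h
    rw [polyVals] at h
    split_ifs at h with h1 h2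
    · simp at h
    · rcases List.mem_cons.mp h with rfl | htail
      · exact ⟨h2, by omega, n, le_refl n, rfl⟩
      · obtain ⟨hb1, hb2, m, hm, hpm⟩ := ih (n+1) v htail
        exact ⟨hb1, hb2, m, by omega, hpm⟩
    · obtain ⟨hb1, hb2, m, hm, hpm⟩ := ih (n+1) v h
      exact ⟨hb1, hb2, m, by omega, hpm⟩

-- membership in polyVals, backward direction (fuel large enough)
lemma mem_polyVals_bwd (k : Int) (hk : 2 ≤ k) : ∀ (fuel : Nat) (n : Int), 0 ≤ n →
    10001 ≤ n + fuel → ∀ v m, n ≤ m → polyN k m = v → 1000 ≤ v → v ≤ 9999 →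
    v ∈ polyVals k fuel n := by
  intro fuel
  induction fuel with
  | zero =>
    intro n hn hfuel v m hm hpm hv1 hv2
    exfalso
    have h1 : m ≤ polyN k m := polyN_ge_self k hk m (by omega)
    omega
  | succ fuel ih =>
    intro n hn hfuel v m hm hpm hv1 hv2
    rw [polyVals]
    have hle : polyN k n ≤ v := hpm ▸ polyN_mono k hk n m hn hm
    rw [if_neg (by omega)]
    rcases eq_or_lt_of_le hm with rfl | hlt
    · rw [if_pos (by omega)]
      subst hpm
      exact List.mem_cons_self
    · have htail : v ∈ polyVals k fuel (n+1) :=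
        ih (n+1) (by omega) (by omega) v m (by omega) hpm hv1 hv2
      split_ifs
      · exact List.mem_cons_of_mem _ htail
      · exact htail

lemma pairwise_polyVals (k : Int) (hk : 2 ≤ k) : ∀ (fuel : Nat) (n : Int), 0 ≤ n →
    (polyVals k fuel n).Pairwise (· < ·) := by
  intro fuel
  induction fuel with
  | zero => intro n hn; simp [polyVals]
  | succ fuel ih =>
    intro n hn
    rw [polyVals]
    split_ifs with h1 h2
    · simp
    · refine List.Pairwise.cons ?_ (ih (n+1) (by omega))
      intro w hw
      obtain ⟨_, _, m, hm, hpm⟩ := mem_polyVals_fwd k fuel (n+1) w hw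
      exact hpm ▸ polyN_strict_mono k hk n m hn (by omega)
    · exact ih (n+1) (by omega)

-- Newton iteration: results are ≥ 1 when x ≥ 2 and the guess is ≥ 1
lemma isqrtIter_pos (x : Int) (hx : 2 ≤ x) : ∀ (fuel : Nat) (g : Int), 1 ≤ g →
    1 ≤ isqrtIter x fuel g := by
  intro fuel
  induction fuel with
  | zero => intro g hg; exact hg
  | succ fuel ih =>
    intro g hg
    rw [isqrtIter]
    have hg0 : (0:Int) < g := by omega
    have hq : 0 ≤ PySem.Int.floordiv x g := by
      rw [PySem.Int.floordiv_eq_ediv_of_pos hg0]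
      exact Int.ediv_nonneg (by omega) (by omega)
    by_cases hcase : (2:Int) ≤ g + PySem.Int.floordiv x g
    · have hn : 1 ≤ PySem.Int.floordiv (g + PySem.Int.floordiv x g) 2 := by
        rw [PySem.Int.floordiv_eq_ediv_of_pos (by norm_num)]
        omega
      split_ifs with h
      · exact ih _ hn
      · exact hg
    · -- then g = 1 and x // g = x ≥ 2, contradiction
      exfalso
      have hg1 : g = 1 := by omega
      rw [hg1, PySem.Int.floordiv_eq_ediv_of_pos (by norm_num), Int.ediv_one] at hcase
      omega

lemma isqrtIter_sq (r : Int) (hr : 1 ≤ r) : ∀ (fuel : Nat) (g : Int), r ≤ g →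
    g.toNat < fuel → isqrtIter (r*r) fuel g = r := by
  intro fuel
  induction fuel with
  | zero => intro g _ h; omega
  | succ fuel ih =>
    intro g hrg hfuel
    rw [isqrtIter]
    have hg0 : (0:Int) < g := by omega
    set q := PySem.Int.floordiv (r*r) g with hq
    have hqe : q = (r*r) / g := by rw [hq, PySem.Int.floordiv_eq_ediv_of_pos hg0]
    have hdiv := Int.ediv_add_emod (r*r) g
    have hmod0 : 0 ≤ (r*r) % g := Int.emod_nonneg _ (by omega)
    have hmodlt : (r*r) % g < g := Int.emod_lt_of_pos _ hg0
    have hkey : 2*r - g ≤ q := by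
      by_contra hcon
      have h1 : q + 1 ≤ 2*r - g := by omega
      nlinarith [sq_nonneg (g - r), mul_le_mul_of_nonneg_left h1 (le_of_lt hg0)]
    set n := PySem.Int.floordiv (g + q) 2 with hn
    have hne : n = (g + q) / 2 := by rw [hn, PySem.Int.floordiv_eq_ediv_of_pos (by norm_num)]
    have hnr : r ≤ n := by
      have : 2*r ≤ g + q := by omega
      omega
    split_ifs with hlt
    · exact ih n hnr (by omega)
    · -- n ≥ g forces g ≤ r, hence g = r
      have hqg : g ≤ q := by omega
      have : g * g ≤ r * r := by nlinarith
      have : g ≤ r := by nlinarith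
      omega

lemma pyIsqrt_sq (r : Int) (hr : 0 ≤ r) : pyIsqrt (r*r) = r := by
  rcases lt_or_ge r 2 with h | h
  · interval_cases r <;> simp [pyIsqrt]
  · rw [pyIsqrt, if_neg (by nlinarith)]
    have hg : r ≤ PySem.Int.floordiv (r*r) 2 := by
      rw [PySem.Int.floordiv_eq_ediv_of_pos (by norm_num)]
      have : r * 2 ≤ r * r := by nlinarith
      omega
    have h1 : PySem.Int.floordiv (r*r) 2 < r*r := by
      rw [PySem.Int.floordiv_eq_ediv_of_pos (by norm_num)]
      have : (2:Int) ≤ r*r := by nlinarith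
      omega
    exact isqrtIter_sq r (by omega) _ _ hg (by omega)

lemma pyIsqrt_nonneg (x : Int) (hx : 0 ≤ x) : 0 ≤ pyIsqrt x := by
  rw [pyIsqrt]
  split_ifs with h
  · exact hx
  · have h2 : (2:Int) ≤ x := by omega
    have hg : 1 ≤ PySem.Int.floordiv x 2 := by
      rw [PySem.Int.floordiv_eq_ediv_of_pos (by norm_num)]
      omega
    have := isqrtIter_pos x h2 x.toNat _ hg
    omega

-- the test is exact: isPoly k v ↔ v is a k-gonal number (k ≥ 2, v ≥ 1)
lemma isPoly_iff (k v : Int) (hk : 2 ≤ k) (hv : 1 ≤ v) :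
    isPoly k v = true ↔ ∃ m : Int, 0 ≤ m ∧ polyN k m = v := by
  rw [isPoly]
  by_cases hk2 : k = 2
  · simp only [if_pos hk2, true_iff]
    refine ⟨v, by omega, ?_⟩
    have := polyN_char 2 v
    have h0 : (2-2:Int)*v*(v-1) + 2*v = 2*v := by ring
    subst hk2
    omega
  · have hk3 : 3 ≤ k := by omega
    simp only [if_neg hk2]
    set d := (k-4)^2 + 8*(k-2)*v with hd
    have hdpos : 2 ≤ d := by nlinarith
    constructor
    · intro h
      set s := pyIsqrt d with hs
      have hs0 : 0 ≤ s := pyIsqrt_nonneg d (by omega)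
      split_ifs at h with hsq
      rw [not_ne_iff] at hsq
      simp only [decide_eq_true_eq] at h
      have hdvd : (2*(k-2)) ∣ ((k-4)+s) := (PySem.Int.mod_eq_zero_iff_dvd _ _).mp h
      obtain ⟨m, hm⟩ := hdvd
      have hm0 : 0 ≤ m := by nlinarith
      refine ⟨m, hm0, ?_⟩
      have hchar := polyN_char k m
      have hsval : s = 2*(k-2)*m - (k-4) := by omega
      have hkey : 4*(k-2)*((k-2)*m*(m-1) + 2*m) = 4*(k-2)*(2*v) := by
        have hss : s*s = d := hsq
        rw [hsval] at hss
        rw [hd] at hss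
        nlinarith [hss]
      have : (k-2)*m*(m-1) + 2*m = 2*v := by
        have hne : (4*(k-2) : Int) ≠ 0 := by omega
        exact mul_left_cancel₀ hne hkey
      omega
    · rintro ⟨m, hm0, hpm⟩
      have hchar := polyN_char k m
      have hm1 : 1 ≤ m := by
        rcases eq_or_lt_of_le hm0 with rfl | h
        · exfalso; have := polyN_zero k; omega
        · omega
      set r := 2*(k-2)*m - (k-4) with hrdef
      have hr0 : 0 ≤ r := by nlinarith
      have hrr : r*r = d := by
        have h2v : 2*v = (k-2)*m*(m-1) + 2*m := by omega
        rw [hrdef, hd]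
        nlinarith [h2v]
      have hs : pyIsqrt d = r := by rw [← hrr]; exact pyIsqrt_sq r hr0
      rw [hs, hrr, if_neg (by simp)]
      have hre : (k-4) + r = (2*(k-2)) * m := by rw [hrdef]; ring
      rw [hre, decide_eq_true_eq]
      exact (PySem.Int.mod_eq_zero_iff_dvd _ _).mpr ⟨m, rfl⟩

-- two strictly increasing Int lists with equal membership are equal
lemma sorted_mem_eq : ∀ (l₁ l₂ : List Int), l₁.Pairwise (· < ·) → l₂.Pairwise (· < ·) →
    (∀ v, v ∈ l₁ ↔ v ∈ l₂) → l₁ = l₂ := by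
  intro l₁
  induction l₁ with
  | nil =>
    intro l₂ _ _ h
    cases l₂ with
    | nil => rfl
    | cons b t₂ => exact absurd ((h b).mpr List.mem_cons_self) (by simp)
  | cons a t ih =>
    intro l₂ hp₁ hp₂ h
    cases l₂ with
    | nil => exact absurd ((h a).mp List.mem_cons_self) (by simp)
    | cons b t₂ =>
      have hab : a = b := by
        rcases List.mem_cons.mp ((h a).mp List.mem_cons_self) with h1 | h1
        · exact h1
        · rcases List.mem_cons.mp ((h b).mpr List.mem_cons_self) with h2 | h2
          · omega
          · have hba : a < b := (List.pairwise_cons.mp hp₁).1 b h2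
            have hab : b < a := (List.pairwise_cons.mp hp₂).1 a h1
            omega
      subst hab
      congr 1
      apply ih t₂ (List.pairwise_cons.mp hp₁).2 (List.pairwise_cons.mp hp₂).2
      intro v
      constructor
      · intro hv
        have hav : a < v := (List.pairwise_cons.mp hp₁).1 v hv
        rcases List.mem_cons.mp ((h v).mp (List.mem_cons_of_mem a hv)) with rfl | h2
        · omega
        · exact h2
      · intro hv
        have hav : a < v := (List.pairwise_cons.mp hp₂).1 v hv
        rcases List.mem_cons.mp ((h v).mpr (List.mem_cons_of_mem a hv)) with rfl | h2
        · omega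
        · exact h2

-- B's filtered range IS the list A's loop buckets
lemma filter_eq_polyVals (k : Int) (hk : 2 ≤ k) :
    (PySem.List.pyRange 1000 10000 1).filter (fun v => isPoly k v) = polyVals k 10001 0 := by
  apply sorted_mem_eq
  · exact (PySem.List.pairwise_lt_pyRange_one 1000 10000).filter _
  · exact pairwise_polyVals k hk 10001 0 le_rfl
  · intro v
    rw [List.mem_filter, PySem.List.mem_pyRange_one]
    constructor
    · rintro ⟨⟨hv1, hv2⟩, hpoly⟩
      obtain ⟨m, hm0, hpm⟩ := (isPoly_iff k v hk (by omega)).mp hpoly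
      exact mem_polyVals_bwd k hk 10001 0 le_rfl (by norm_num) v m hm0 hpm (by omega) (by omega)
    · intro hv
      obtain ⟨hb1, hb2, m, hm, hpm⟩ := mem_polyVals_fwd k 10001 0 v hv
      exact ⟨⟨by omega, by omega⟩, (isPoly_iff k v hk (by omega)).mpr ⟨m, hm, hpm⟩⟩

-- ===== VERDICT (by name: the statement is the Claim_ definition above) =====
theorem figurate_spec : Claim_equal_figurate := by
  intro k _ hk
  unfold Spec_figurate figurate figurate_alt
  rw [foldl_if_filter, filter_eq_polyVals k hk]
  have h0 : polyN k 0 = 0 := polyN_zero k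
  have h := loopA_eq_foldl k 10001 0 PySem.Dict.empty
  rw [h0] at h
  rw [← h]
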